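-- pv_equiv track=rewrite | github.com/waynebhayes/BLANT | seeding/node_pair_extraction_helpers.py | create_node_pair_voting
-- ===== SOURCE A (Python) =====
-- from collections import defaultdict
--
-- def aug(node, n):
--     return f'{n}_{node}'
--
-- def create_node_pair_voting(all_seeds_list):
--     def add_to_voting(node1, node2):
--         if node1 not in node_pair_voting:
--             node_pair_voting[node1] = defaultdict(int)
--
--         if node2 not in node_pair_voting:
--             node_pair_voting[node2] = defaultdict(int)
--
--         node_pair_voting[node1][node2] += 1
--         node_pair_voting[node2][node1] += 1
--
--     node_pair_voting = dict()
--
--     for graphlet_id, s1_index, s2_index in all_seeds_list: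
--         for s1_node, s2_node in zip(s1_index, s2_index):
--             add_to_voting(aug(s1_node, 1), aug(s2_node, 2))
--
--     return node_pair_voting
-- ===== SOURCE B (Python) =====
-- from collections import defaultdict
--
-- def aug(node, n):
--     return f'{n}_{node}'
--
--
-- def create_node_pair_voting(all_seeds_list):
--     # Pass 1: flatten to augmented node pairs and count votes in a flat table.
--     pairs = [(aug(s1_node, 1), aug(s2_node, 2))
--              for _, s1_index, s2_index in all_seeds_list
--              for s1_node, s2_node in zip(s1_index, s2_index)]
--     counts = defaultdict(int)
--     for x, y in pairs:
--         counts[x, y] += 1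
--         counts[y, x] += 1
--     # Pass 2: materialize the nested map with the final counts.
--     node_pair_voting = {}
--     for x, y in pairs:
--         if x not in node_pair_voting:
--             node_pair_voting[x] = defaultdict(int)
--         if y not in node_pair_voting:
--             node_pair_voting[y] = defaultdict(int)
--         node_pair_voting[x][y] = counts[x, y]
--         node_pair_voting[y][x] = counts[y, x]
--     return node_pair_voting
-- ===== Notes on version B (the rewrite author's own statement) =====
-- stated objective: alternative
-- what changed: B separates counting from structure-building: one pass flattens all seeds into a list of augmented pairs and accumulates a flat defaultdict counter keyed by ordered pairs (both directions), then a second pass materializes the nested map by assigning the final counts, instead of A's single pass that increments the nested dict in place via a closure.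
import Mathlib
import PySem

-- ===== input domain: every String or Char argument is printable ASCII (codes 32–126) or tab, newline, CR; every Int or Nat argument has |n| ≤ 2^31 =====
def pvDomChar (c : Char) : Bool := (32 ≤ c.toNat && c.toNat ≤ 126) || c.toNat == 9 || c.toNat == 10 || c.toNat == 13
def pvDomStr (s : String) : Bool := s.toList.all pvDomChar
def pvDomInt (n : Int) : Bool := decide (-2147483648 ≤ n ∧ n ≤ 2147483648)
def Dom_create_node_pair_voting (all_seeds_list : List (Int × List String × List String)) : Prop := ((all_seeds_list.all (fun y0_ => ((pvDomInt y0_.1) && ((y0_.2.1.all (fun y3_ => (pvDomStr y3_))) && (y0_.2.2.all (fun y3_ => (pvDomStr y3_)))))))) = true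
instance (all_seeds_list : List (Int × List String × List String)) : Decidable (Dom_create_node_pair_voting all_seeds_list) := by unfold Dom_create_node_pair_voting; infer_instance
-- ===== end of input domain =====

-- B separates vote counting (a flat pair-keyed counter built in one pass) from building the
-- nested map (a second pass assigning the final counts); same cost, different decomposition.


-- ===== PORT A =====
-- aug(node, n) = f'{n}_{node}'
def pvAug (node : String) (n : Int) : String := PySem.Int.toStr n ++ "_" ++ node

-- add_to_voting(node1, node2): insert missing outer defaultdicts, then increment both directions
def pvAddToVoting (d : PySem.Dict String (PySem.Dict String Int)) (node1 node2 : String) :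
    PySem.Dict String (PySem.Dict String Int) :=
  let d1 := if d.contains node1 then d else d.insert node1 PySem.Dict.empty
  let d2 := if d1.contains node2 then d1 else d1.insert node2 PySem.Dict.empty
  let d3 := d2.modify node1 PySem.Dict.empty (fun inner => inner.modify node2 0 (· + 1))
  d3.modify node2 PySem.Dict.empty (fun inner => inner.modify node1 0 (· + 1))

def create_node_pair_voting (all_seeds_list : List (Int × List String × List String)) :
    List (String × List (String × Int)) :=
  let voting := all_seeds_list.foldl (fun d seed =>
    (seed.2.1.zip seed.2.2).foldl (fun d p => pvAddToVoting d (pvAug p.1 1) (pvAug p.2 2)) d)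
    PySem.Dict.empty
  voting.items.map (fun p => (p.1, p.2.items))

-- ===== PORT B =====
-- pass 0: flatten all seeds to augmented node pairs
def pvPairs (all_seeds_list : List (Int × List String × List String)) : List (String × String) :=
  all_seeds_list.flatMap (fun seed =>
    (seed.2.1.zip seed.2.2).map (fun p => (pvAug p.1 1, pvAug p.2 2)))

-- pass 1: flat counter keyed by ordered pairs, both directions incremented
def pvCounts (pairs : List (String × String)) : PySem.Dict (String × String) Int :=
  pairs.foldl (fun c p => (c.modify (p.1, p.2) 0 (· + 1)).modify (p.2, p.1) 0 (· + 1))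
    PySem.Dict.empty

-- pass 2: materialize the nested map, assigning the final counts
def pvVoteStep (counts : PySem.Dict (String × String) Int)
    (d : PySem.Dict String (PySem.Dict String Int)) (p : String × String) :
    PySem.Dict String (PySem.Dict String Int) :=
  let d1 := if d.contains p.1 then d else d.insert p.1 PySem.Dict.empty
  let d2 := if d1.contains p.2 then d1 else d1.insert p.2 PySem.Dict.empty
  let d3 := d2.modify p.1 PySem.Dict.empty (fun inner => inner.insert p.2 (counts.getD (p.1, p.2) 0))
  d3.modify p.2 PySem.Dict.empty (fun inner => inner.insert p.1 (counts.getD (p.2, p.1) 0))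

def create_node_pair_voting_alt (all_seeds_list : List (Int × List String × List String)) :
    List (String × List (String × Int)) :=
  let pairs := pvPairs all_seeds_list
  let counts := pvCounts pairs
  let voting := pairs.foldl (pvVoteStep counts) PySem.Dict.empty
  voting.items.map (fun p => (p.1, p.2.items))

-- ===== PRECONDITION & SPEC =====
def Spec_create_node_pair_voting (all_seeds_list : List (Int × List String × List String)) (out : List (String × List (String × Int))) : Prop := out = create_node_pair_voting_alt all_seeds_list
instance (all_seeds_list : List (Int × List String × List String)) (out : List (String × List (String × Int))) : Decidable (Spec_create_node_pair_voting all_seeds_list out) := by unfold Spec_create_node_pair_voting; infer_instance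

-- ===== CLAIM (what is proved, stated in full; the proofs are below) =====
def Claim_equal_create_node_pair_voting : Prop := ∀ (all_seeds_list : List (Int × List String × List String)), Dom_create_node_pair_voting all_seeds_list → Spec_create_node_pair_voting all_seeds_list (create_node_pair_voting all_seeds_list)

-- ===== LEMMAS AND PROOFS =====

-- value map on an inner dict: keep keys/order, replace every value by g key
def pvValMap (g : String → Int) (inner : PySem.Dict String Int) : PySem.Dict String Int :=
  PySem.Dict.mk (inner.items.map (fun q => (q.1, g q.1)))

-- relabel every inner value at outer key u, inner key v by c u v
def pvRelabel (c : String → String → Int) (d : PySem.Dict String (PySem.Dict String Int)) :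
    PySem.Dict String (PySem.Dict String Int) :=
  PySem.Dict.mk (d.items.map (fun p => (p.1, pvValMap (c p.1) p.2)))

-- each event doubled with its swap: the multiset of A's increments
def pvDoubled (l : List (String × String)) : List (String × String) :=
  l.flatMap (fun p => [p, (p.2, p.1)])

theorem pv_contains_valMap (g : String → Int) (inner : PySem.Dict String Int) (v : String) :
    (pvValMap g inner).contains v = inner.contains v := by
  simp [pvValMap, PySem.Dict.contains, List.any_map, Function.comp_def]

theorem pv_valMap_insert (g : String → Int) (inner : PySem.Dict String Int) (v : String) (w : Int) :
    pvValMap g (inner.insert v w) = (pvValMap g inner).insert v (g v) := by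
  by_cases h : inner.contains v = true
  · have h' : (pvValMap g inner).contains v = true := by rw [pv_contains_valMap]; exact h
    apply PySem.Dict.ext
    show ((inner.insert v w).items.map _) = _
    rw [PySem.Dict.items_insert_of_contains _ _ h, PySem.Dict.items_insert_of_contains _ _ h']
    show _ = ((inner.items.map _).map _)
    rw [List.map_map, List.map_map]
    apply List.map_congr_left
    intro q _
    by_cases hv : (q.1 == v) = true
    · have hq : q.1 = v := eq_of_beq hv
      simp [Function.comp, hq]
    · simp [Function.comp, hv]
  · have hb : inner.contains v = false := by simpa using h
    have h' : (pvValMap g inner).contains v = false := by rw [pv_contains_valMap]; exact hb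
    apply PySem.Dict.ext
    show ((inner.insert v w).items.map _) = _
    rw [PySem.Dict.items_insert_of_not_contains _ _ hb, PySem.Dict.items_insert_of_not_contains _ _ h']
    simp [pvValMap]

theorem pv_contains_relabel (c : String → String → Int)
    (d : PySem.Dict String (PySem.Dict String Int)) (u : String) :
    (pvRelabel c d).contains u = d.contains u := by
  simp [pvRelabel, PySem.Dict.contains, List.any_map, Function.comp_def]

theorem pv_get?_relabel (c : String → String → Int)
    (d : PySem.Dict String (PySem.Dict String Int)) (u : String) :
    (pvRelabel c d).get? u = (d.get? u).map (pvValMap (c u)) := by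
  have hcomp : ((fun p : String × PySem.Dict String Int => p.1 == u) ∘
      (fun p : String × PySem.Dict String Int => (p.1, pvValMap (c p.1) p.2)))
      = fun p : String × PySem.Dict String Int => p.1 == u := rfl
  simp only [pvRelabel, PySem.Dict.get?, List.find?_map, hcomp]
  cases hf : List.find? (fun p : String × PySem.Dict String Int => p.1 == u) d.items with
  | none => simp
  | some p =>
      have hp : p.1 = u := eq_of_beq (by simpa using List.find?_some hf)
      simp [hp]

theorem pv_getD_relabel (c : String → String → Int)
    (d : PySem.Dict String (PySem.Dict String Int)) (u : String) :
    (pvRelabel c d).getD u PySem.Dict.empty = pvValMap (c u) (d.getD u PySem.Dict.empty) := by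
  rw [PySem.Dict.getD_eq_get?_getD, PySem.Dict.getD_eq_get?_getD, pv_get?_relabel]
  cases d.get? u with
  | none => rfl
  | some inner => rfl

theorem pv_relabel_insert_empty (c : String → String → Int)
    (d : PySem.Dict String (PySem.Dict String Int)) (u : String)
    (h : d.contains u = false) :
    pvRelabel c (d.insert u PySem.Dict.empty) = (pvRelabel c d).insert u PySem.Dict.empty := by
  have h' : (pvRelabel c d).contains u = false := by rw [pv_contains_relabel]; exact h
  apply PySem.Dict.ext
  show ((d.insert u PySem.Dict.empty).items.map _) = _
  rw [PySem.Dict.items_insert_of_not_contains _ _ h, PySem.Dict.items_insert_of_not_contains _ _ h']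
  simp [pvRelabel, pvValMap, PySem.Dict.empty]

theorem pv_relabel_modify (c : String → String → Int)
    (d : PySem.Dict String (PySem.Dict String Int)) (u : String)
    (fA fB : PySem.Dict String Int → PySem.Dict String Int)
    (hf : ∀ inner, pvValMap (c u) (fA inner) = fB (pvValMap (c u) inner)) :
    pvRelabel c (d.modify u PySem.Dict.empty fA) = (pvRelabel c d).modify u PySem.Dict.empty fB := by
  rw [PySem.Dict.modify, PySem.Dict.modify, pv_getD_relabel]
  by_cases h : d.contains u = true
  · have h' : (pvRelabel c d).contains u = true := by rw [pv_contains_relabel]; exact h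
    apply PySem.Dict.ext
    show ((d.insert u (fA (d.getD u PySem.Dict.empty))).items.map _) = _
    rw [PySem.Dict.items_insert_of_contains _ _ h, PySem.Dict.items_insert_of_contains _ _ h']
    show _ = ((d.items.map _).map _)
    rw [List.map_map, List.map_map]
    apply List.map_congr_left
    intro p _
    by_cases hv : p.1 = u
    · simp [hv, hf]
    · simp [hv]
  · have hb : d.contains u = false := by simpa using h
    have h' : (pvRelabel c d).contains u = false := by rw [pv_contains_relabel]; exact hb
    apply PySem.Dict.ext
    show ((d.insert u (fA (d.getD u PySem.Dict.empty))).items.map _) = _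
    rw [PySem.Dict.items_insert_of_not_contains _ _ hb, PySem.Dict.items_insert_of_not_contains _ _ h']
    rw [PySem.Dict.getD_of_not_contains _ _ hb]
    have hfe : pvValMap (c u) (fA PySem.Dict.empty) = fB PySem.Dict.empty := hf PySem.Dict.empty
    have hVE : pvValMap (c u) PySem.Dict.empty = PySem.Dict.empty := rfl
    simp [pvRelabel, hfe, hVE]

theorem pv_relabel_guard (c : String → String → Int)
    (d : PySem.Dict String (PySem.Dict String Int)) (u : String) :
    pvRelabel c (if d.contains u then d else d.insert u PySem.Dict.empty)
      = (if (pvRelabel c d).contains u then pvRelabel c d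
         else (pvRelabel c d).insert u PySem.Dict.empty) := by
  rw [pv_contains_relabel]
  by_cases h : d.contains u = true
  · simp [h]
  · have hb : d.contains u = false := by simpa using h
    simp only [hb, Bool.false_eq_true, if_false]
    exact pv_relabel_insert_empty c d u hb

theorem pv_step_commute (counts : PySem.Dict (String × String) Int)
    (d : PySem.Dict String (PySem.Dict String Int)) (p : String × String) :
    pvVoteStep counts (pvRelabel (fun u v => counts.getD (u, v) 0) d) p
      = pvRelabel (fun u v => counts.getD (u, v) 0) (pvAddToVoting d p.1 p.2) := by
  obtain ⟨x, y⟩ := p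
  simp only [pvVoteStep, pvAddToVoting]
  rw [pv_relabel_modify (fun u v => counts.getD (u, v) 0) _ y
        (fun inner => inner.modify x 0 (· + 1))
        (fun inner => inner.insert x (counts.getD (y, x) 0))
        (fun inner => pv_valMap_insert _ inner x _)]
  rw [pv_relabel_modify (fun u v => counts.getD (u, v) 0) _ x
        (fun inner => inner.modify y 0 (· + 1))
        (fun inner => inner.insert y (counts.getD (x, y) 0))
        (fun inner => pv_valMap_insert _ inner y _)]
  rw [pv_relabel_guard, pv_relabel_guard]

theorem pv_fold_commute (counts : PySem.Dict (String × String) Int)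
    (l : List (String × String)) (d : PySem.Dict String (PySem.Dict String Int)) :
    l.foldl (pvVoteStep counts) (pvRelabel (fun u v => counts.getD (u, v) 0) d)
      = pvRelabel (fun u v => counts.getD (u, v) 0)
          (l.foldl (fun d p => pvAddToVoting d p.1 p.2) d) := by
  induction l generalizing d with
  | nil => rfl
  | cons p t ih =>
      rw [List.foldl_cons, pv_step_commute]
      exact ih _

-- value at (u, v) through two defaulted lookups
def pvValAt (d : PySem.Dict String (PySem.Dict String Int)) (u v : String) : Int :=
  (d.getD u PySem.Dict.empty).getD v 0

theorem pv_valAt_guard (d : PySem.Dict String (PySem.Dict String Int)) (x u v : String) :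
    pvValAt (if d.contains x then d else d.insert x PySem.Dict.empty) u v = pvValAt d u v := by
  by_cases h : d.contains x = true
  · simp [h]
  · have hb : d.contains x = false := by simpa using h
    simp only [hb, Bool.false_eq_true, if_false]
    unfold pvValAt
    rw [PySem.Dict.getD_insert]
    by_cases hu : u = x
    · subst hu
      rw [if_pos rfl, PySem.Dict.getD_of_not_contains _ _ hb]
    · rw [if_neg hu]

theorem pv_valAt_modifyA (d : PySem.Dict String (PySem.Dict String Int)) (x y u v : String) :
    pvValAt (d.modify x PySem.Dict.empty (fun inner => inner.modify y 0 (· + 1))) u v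
      = pvValAt d u v + (if (u, v) = (x, y) then 1 else 0) := by
  unfold pvValAt
  rw [PySem.Dict.getD_modify]
  by_cases hu : u = x
  · subst hu
    rw [if_pos rfl, PySem.Dict.getD_modify]
    by_cases hv : v = y
    · subst hv; simp
    · simp [hv, Prod.ext_iff]
  · simp [hu, Prod.ext_iff]

theorem pv_valAt_step (d : PySem.Dict String (PySem.Dict String Int)) (x y u v : String) :
    pvValAt (pvAddToVoting d x y) u v
      = pvValAt d u v + (if (u, v) = (x, y) then 1 else 0) + (if (u, v) = (y, x) then 1 else 0) := by
  simp only [pvAddToVoting]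
  rw [pv_valAt_modifyA, pv_valAt_modifyA, pv_valAt_guard, pv_valAt_guard]

theorem pv_valAt_fold (l : List (String × String)) (d : PySem.Dict String (PySem.Dict String Int))
    (u v : String) :
    pvValAt (l.foldl (fun d p => pvAddToVoting d p.1 p.2) d) u v
      = pvValAt d u v + ((pvDoubled l).count (u, v) : Int) := by
  induction l generalizing d with
  | nil => simp [pvDoubled]
  | cons p t ih =>
      obtain ⟨a, b⟩ := p
      have hd : pvDoubled ((a, b) :: t) = (a, b) :: (b, a) :: pvDoubled t := by
        simp [pvDoubled]
      simp only [List.foldl_cons]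
      rw [ih, pv_valAt_step, hd]
      simp only [List.count_cons, beq_iff_eq,
        @eq_comm (String × String) (a, b) (u, v), @eq_comm (String × String) (b, a) (u, v)]
      push_cast
      split_ifs <;> omega

theorem pv_counts_aux (l : List (String × String)) (acc : PySem.Dict (String × String) Int) :
    l.foldl (fun c p => (c.modify (p.1, p.2) 0 (· + 1)).modify (p.2, p.1) 0 (· + 1)) acc
      = (pvDoubled l).foldl (fun d x => d.modify x 0 (· + 1)) acc := by
  induction l generalizing acc with
  | nil => rfl
  | cons p t ih =>
      simp only [pvDoubled] at ih
      simp only [pvDoubled, List.flatMap_cons, List.foldl_cons, List.foldl_append]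
      rw [ih]
      rfl

theorem pv_counts_eq_counter (pairs : List (String × String)) :
    pvCounts pairs = PySem.Dict.counter (pvDoubled pairs) := by
  rw [PySem.Dict.counter_eq_foldl]
  exact pv_counts_aux pairs PySem.Dict.empty

-- well-formedness: outer keys and every inner dict's keys are duplicate-free
def pvWF (d : PySem.Dict String (PySem.Dict String Int)) : Prop :=
  d.keys.Nodup ∧ ∀ p ∈ d.items, p.2.keys.Nodup

theorem pv_wf_guard (d : PySem.Dict String (PySem.Dict String Int)) (x : String)
    (h : pvWF d) : pvWF (if d.contains x then d else d.insert x PySem.Dict.empty) := by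
  by_cases hc : d.contains x = true
  · simpa [hc] using h
  · have hb : d.contains x = false := by simpa using hc
    simp only [hb, Bool.false_eq_true, if_false]
    refine ⟨PySem.Dict.nodup_keys_insert _ _ _ h.1, ?_⟩
    intro p hp
    rcases (PySem.Dict.mem_items_insert _ _ _ _).1 hp with hp1 | ⟨hp2, _⟩
    · subst hp1; simp [PySem.Dict.keys_empty]
    · exact h.2 _ hp2

theorem pv_wf_modify (d : PySem.Dict String (PySem.Dict String Int)) (u v : String)
    (h : pvWF d) : pvWF (d.modify u PySem.Dict.empty (fun inner => inner.modify v 0 (· + 1))) := by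
  rw [PySem.Dict.modify]
  refine ⟨PySem.Dict.nodup_keys_insert _ _ _ h.1, ?_⟩
  intro p hp
  rcases (PySem.Dict.mem_items_insert _ _ _ _).1 hp with hp1 | ⟨hp2, _⟩
  · subst hp1
    rw [PySem.Dict.modify]
    apply PySem.Dict.nodup_keys_insert
    rw [PySem.Dict.getD_eq_get?_getD]
    cases hg : d.get? u with
    | none => simp [PySem.Dict.keys_empty]
    | some inner =>
        exact h.2 _ (PySem.Dict.mem_items_of_get?_eq_some _ hg)
  · exact h.2 _ hp2

theorem pv_wf_step (d : PySem.Dict String (PySem.Dict String Int)) (x y : String)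
    (h : pvWF d) : pvWF (pvAddToVoting d x y) := by
  simp only [pvAddToVoting]
  exact pv_wf_modify _ y x (pv_wf_modify _ x y (pv_wf_guard _ y (pv_wf_guard _ x h)))

theorem pv_wf_foldAux (l : List (String × String)) (d : PySem.Dict String (PySem.Dict String Int))
    (h : pvWF d) : pvWF (l.foldl (fun d p => pvAddToVoting d p.1 p.2) d) := by
  induction l generalizing d with
  | nil => exact h
  | cons p t ih => exact ih _ (pv_wf_step _ _ _ h)

theorem pv_wf_empty : pvWF (PySem.Dict.empty : PySem.Dict String (PySem.Dict String Int)) := by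
  refine ⟨by simp [PySem.Dict.keys_empty], ?_⟩
  intro p hp
  simp [PySem.Dict.empty] at hp

theorem pv_wf_fold (l : List (String × String)) :
    pvWF (l.foldl (fun d p => pvAddToVoting d p.1 p.2) PySem.Dict.empty) :=
  pv_wf_foldAux l PySem.Dict.empty pv_wf_empty

theorem pv_relabel_fixpoint (c : String → String → Int)
    (D : PySem.Dict String (PySem.Dict String Int)) (hwf : pvWF D)
    (hval : ∀ u v inner val, D.get? u = some inner → inner.get? v = some val → val = c u v) :
    pvRelabel c D = D := by
  apply PySem.Dict.ext
  show D.items.map _ = D.items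
  conv_rhs => rw [← List.map_id D.items]
  apply List.map_congr_left
  intro p hp
  obtain ⟨u, inner⟩ := p
  have hgu : D.get? u = some inner := PySem.Dict.get?_of_mem_items _ hp hwf.1
  have hinner : pvValMap (c u) inner = inner := by
    apply PySem.Dict.ext
    show inner.items.map _ = inner.items
    conv_rhs => rw [← List.map_id inner.items]
    apply List.map_congr_left
    intro q hq
    obtain ⟨v, val⟩ := q
    have hgv : inner.get? v = some val := PySem.Dict.get?_of_mem_items _ hq (hwf.2 _ hp)
    have hcv := hval u v inner val hgu hgv
    simp [hcv]
  simp [hinner]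

theorem pv_A_flat (all_seeds_list : List (Int × List String × List String)) :
    create_node_pair_voting all_seeds_list
      = ((pvPairs all_seeds_list).foldl (fun d p => pvAddToVoting d p.1 p.2)
          PySem.Dict.empty).items.map (fun p => (p.1, p.2.items)) := by
  have hmap : ∀ (acc : PySem.Dict String (PySem.Dict String Int))
      (seed : Int × List String × List String),
      ((seed.2.1.zip seed.2.2).map (fun p => (pvAug p.1 1, pvAug p.2 2))).foldl
          (fun d p => pvAddToVoting d p.1 p.2) acc
        = (seed.2.1.zip seed.2.2).foldl
            (fun d p => pvAddToVoting d (pvAug p.1 1) (pvAug p.2 2)) acc := by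
    intro acc seed
    rw [List.foldl_map]
  simp only [create_node_pair_voting, pvPairs, List.foldl_flatMap, hmap]

-- ===== VERDICT (by name: the statement is the Claim_ definition above) =====
theorem create_node_pair_voting_spec : Claim_equal_create_node_pair_voting := by
  intro l _
  unfold Spec_create_node_pair_voting
  rw [pv_A_flat]
  simp only [create_node_pair_voting_alt]
  have hfold := pv_fold_commute (pvCounts (pvPairs l)) (pvPairs l) PySem.Dict.empty
  have hrel_empty : pvRelabel (fun u v => (pvCounts (pvPairs l)).getD (u, v) 0) PySem.Dict.empty
      = PySem.Dict.empty := rfl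
  rw [hrel_empty] at hfold
  rw [hfold]
  have hfix : pvRelabel (fun u v => (pvCounts (pvPairs l)).getD (u, v) 0)
      ((pvPairs l).foldl (fun d p => pvAddToVoting d p.1 p.2) PySem.Dict.empty)
      = (pvPairs l).foldl (fun d p => pvAddToVoting d p.1 p.2) PySem.Dict.empty := by
    apply pv_relabel_fixpoint _ _ (pv_wf_fold (pvPairs l))
    intro u v inner val hgu hgv
    show val = (pvCounts (pvPairs l)).getD (u, v) 0
    have hval : pvValAt ((pvPairs l).foldl (fun d p => pvAddToVoting d p.1 p.2) PySem.Dict.empty) u v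
        = val := by
      have h1 : ((pvPairs l).foldl (fun d p => pvAddToVoting d p.1 p.2)
          PySem.Dict.empty).getD u PySem.Dict.empty = inner := by
        rw [PySem.Dict.getD_eq_get?_getD, hgu]; rfl
      unfold pvValAt
      rw [h1, PySem.Dict.getD_eq_get?_getD, hgv]
      rfl
    have hcount : pvValAt ((pvPairs l).foldl (fun d p => pvAddToVoting d p.1 p.2) PySem.Dict.empty) u v
        = ((pvDoubled (pvPairs l)).count (u, v) : Int) := by
      rw [pv_valAt_fold]
      simp [pvValAt, PySem.Dict.getD_empty]
    rw [pv_counts_eq_counter, PySem.Dict.getD_counter, ← hcount, hval]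
  rw [hfix]
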